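-- pv_equiv track=rewrite | github.com/airhao3/echosub-open | backend/app/services/translation/context_translator.py | _is_same_language_family
-- ===== SOURCE A (Python) =====
-- def _is_same_language_family(lang1: str, lang2: str) -> bool:
--     """
--     Check if two languages are from the same family to determine
--     if returning original text makes sense.
--     """
--     # Language family mappings
--     chinese_variants = {'zh', 'zh-cn', 'zh-tw', 'zh-hk', 'chinese', 'mandarin', 'cantonese'}
--     english_variants = {'en', 'en-us', 'en-gb', 'english'}
--     spanish_variants = {'es', 'es-es', 'es-mx', 'spanish', 'castellano'}
--
--     lang1_lower = lang1.lower()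
--     lang2_lower = lang2.lower()
--
--     # Check if both languages are in the same family
--     for family in [chinese_variants, english_variants, spanish_variants]:
--         if lang1_lower in family and lang2_lower in family:
--             return True
--
--     return lang1_lower == lang2_lower
-- ===== SOURCE B (Python) =====
-- # B: normalize-then-compare. Each language is mapped to a canonical
-- # representative (known variants collapse to their family's base code,
-- # unknown strings canonicalize to themselves), then one equality decides.
-- # This removes A's loop over family sets and its separate equality fallback:
-- # correctness: two strings compare equal after canonicalization iff they are
-- # in the same family, or both unknown and literally equal (a known variant can
-- # never equal an unknown string's canonical form, since representatives are
-- # themselves variants).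
-- _CANON = {
--     'zh': 'zh', 'zh-cn': 'zh', 'zh-tw': 'zh', 'zh-hk': 'zh',
--     'chinese': 'zh', 'mandarin': 'zh', 'cantonese': 'zh',
--     'en': 'en', 'en-us': 'en', 'en-gb': 'en', 'english': 'en',
--     'es': 'es', 'es-es': 'es', 'es-mx': 'es',
--     'spanish': 'es', 'castellano': 'es',
-- }
--
-- def _canonical(lang: str) -> str:
--     l = lang.lower()
--     return _CANON.get(l, l)
--
-- def _is_same_language_family(lang1: str, lang2: str) -> bool:
--     return _canonical(lang1) == _canonical(lang2)
-- ===== Notes on version B (the rewrite author's own statement) =====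
-- stated objective: simpler
-- what changed: Replaced the loop over three family sets plus a separate string-equality fallback with a canonicalization function (each variant maps to its family's representative code, unknown strings to themselves) followed by a single equality on canonical forms.
import Mathlib
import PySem

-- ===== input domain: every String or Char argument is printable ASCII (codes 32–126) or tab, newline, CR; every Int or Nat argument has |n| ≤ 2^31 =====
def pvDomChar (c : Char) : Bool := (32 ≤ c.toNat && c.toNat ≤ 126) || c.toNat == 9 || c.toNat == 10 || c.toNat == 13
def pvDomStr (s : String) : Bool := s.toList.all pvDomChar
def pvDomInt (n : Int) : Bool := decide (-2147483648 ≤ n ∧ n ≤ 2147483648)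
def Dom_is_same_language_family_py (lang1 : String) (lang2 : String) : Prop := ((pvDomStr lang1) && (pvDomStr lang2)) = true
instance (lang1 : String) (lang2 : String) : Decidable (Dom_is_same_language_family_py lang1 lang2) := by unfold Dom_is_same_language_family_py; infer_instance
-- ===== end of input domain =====

-- B canonicalizes each language to a representative (unknowns map to themselves) and compares once, replacing A's family-set scan plus equality fallback (simpler).
-- ===== PORT A =====
def is_same_language_family_py (lang1 : String) (lang2 : String) : Bool :=
  let chinese_variants : PySem.Set String :=
    PySem.Set.ofList ["zh", "zh-cn", "zh-tw", "zh-hk", "chinese", "mandarin", "cantonese"]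
  let english_variants : PySem.Set String :=
    PySem.Set.ofList ["en", "en-us", "en-gb", "english"]
  let spanish_variants : PySem.Set String :=
    PySem.Set.ofList ["es", "es-es", "es-mx", "spanish", "castellano"]
  let lang1_lower := PySem.Str.lower lang1
  let lang2_lower := PySem.Str.lower lang2
  -- for family in [...]: if lang1_lower in family and lang2_lower in family: return True
  if [chinese_variants, english_variants, spanish_variants].any
      (fun family => PySem.Set.contains family lang1_lower && PySem.Set.contains family lang2_lower)
  then true
  else lang1_lower == lang2_lower

-- ===== PORT B =====
def pvCanonMap : PySem.Dict String String := PySem.Dict.mk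
  [("zh", "zh"), ("zh-cn", "zh"), ("zh-tw", "zh"), ("zh-hk", "zh"),
   ("chinese", "zh"), ("mandarin", "zh"), ("cantonese", "zh"),
   ("en", "en"), ("en-us", "en"), ("en-gb", "en"), ("english", "en"),
   ("es", "es"), ("es-es", "es"), ("es-mx", "es"),
   ("spanish", "es"), ("castellano", "es")]

def pvCanonical (lang : String) : String :=
  let l := PySem.Str.lower lang
  PySem.Dict.getD pvCanonMap l l

def is_same_language_family_py_alt (lang1 : String) (lang2 : String) : Bool :=
  pvCanonical lang1 == pvCanonical lang2

-- ===== PRECONDITION & SPEC =====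
def Spec_is_same_language_family_py (lang1 : String) (lang2 : String) (out : Bool) : Prop := out = is_same_language_family_py_alt lang1 lang2
instance (lang1 : String) (lang2 : String) (out : Bool) : Decidable (Spec_is_same_language_family_py lang1 lang2 out) := by unfold Spec_is_same_language_family_py; infer_instance

-- ===== CLAIM (what is proved, stated in full; the proofs are below) =====
def Claim_equal_is_same_language_family_py : Prop := ∀ (lang1 : String) (lang2 : String), Dom_is_same_language_family_py lang1 lang2 → Spec_is_same_language_family_py lang1 lang2 (is_same_language_family_py lang1 lang2)

-- ===== LEMMAS AND PROOFS =====
-- all 16 variant strings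
def pvAllVariants : List String :=
  ["zh", "zh-cn", "zh-tw", "zh-hk", "chinese", "mandarin", "cantonese",
   "en", "en-us", "en-gb", "english",
   "es", "es-es", "es-mx", "spanish", "castellano"]

lemma pv_core (s t : String) :
    is_same_language_family_py s t = is_same_language_family_py_alt s t := by
  unfold is_same_language_family_py is_same_language_family_py_alt pvCanonical
  simp only []
  generalize PySem.Str.lower s = a
  generalize PySem.Str.lower t = b
  by_cases ha : a ∈ pvAllVariants
  · by_cases hb : b ∈ pvAllVariants
    · simp only [pvAllVariants, List.mem_cons, List.not_mem_nil, or_false] at ha hb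
      rcases ha with rfl|rfl|rfl|rfl|rfl|rfl|rfl|rfl|rfl|rfl|rfl|rfl|rfl|rfl|rfl|rfl <;>
        rcases hb with rfl|rfl|rfl|rfl|rfl|rfl|rfl|rfl|rfl|rfl|rfl|rfl|rfl|rfl|rfl|rfl <;>
        decide
    · simp only [pvAllVariants, List.mem_cons, List.not_mem_nil, or_false] at ha
      simp only [pvAllVariants, List.mem_cons, List.not_mem_nil, or_false, not_or] at hb
      obtain ⟨h1,h2,h3,h4,h5,h6,h7,h8,h9,h10,h11,h12,h13,h14,h15,h16⟩ := hb
      rcases ha with rfl|rfl|rfl|rfl|rfl|rfl|rfl|rfl|rfl|rfl|rfl|rfl|rfl|rfl|rfl|rfl <;>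
      simp [pvCanonMap, PySem.Set.contains, PySem.Set.ofList, PySem.Set.add,
        PySem.Dict.getD, PySem.Dict.get?,
        h1, h2, h3, h4, h5, h6, h7, h8, h9, h10, h11, h12, h13, h14, h15, h16,
        Ne.symm h1, Ne.symm h2, Ne.symm h3, Ne.symm h4, Ne.symm h5, Ne.symm h6, Ne.symm h7,
        Ne.symm h8, Ne.symm h9, Ne.symm h10, Ne.symm h11, Ne.symm h12, Ne.symm h13,
        Ne.symm h14, Ne.symm h15, Ne.symm h16]
  · simp only [pvAllVariants, List.mem_cons, List.not_mem_nil, or_false, not_or] at ha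
    obtain ⟨h1,h2,h3,h4,h5,h6,h7,h8,h9,h10,h11,h12,h13,h14,h15,h16⟩ := ha
    by_cases hb : b ∈ pvAllVariants
    · simp only [pvAllVariants, List.mem_cons, List.not_mem_nil, or_false] at hb
      rcases hb with rfl|rfl|rfl|rfl|rfl|rfl|rfl|rfl|rfl|rfl|rfl|rfl|rfl|rfl|rfl|rfl <;>
        simp [pvCanonMap, PySem.Set.contains, PySem.Set.ofList, PySem.Set.add,
          PySem.Dict.getD, PySem.Dict.get?,
          h1, h2, h3, h4, h5, h6, h7, h8, h9, h10, h11, h12, h13, h14, h15, h16,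
          Ne.symm h1, Ne.symm h2, Ne.symm h3, Ne.symm h4, Ne.symm h5, Ne.symm h6, Ne.symm h7,
          Ne.symm h8, Ne.symm h9, Ne.symm h10, Ne.symm h11, Ne.symm h12, Ne.symm h13,
          Ne.symm h14, Ne.symm h15, Ne.symm h16]
    · simp only [pvAllVariants, List.mem_cons, List.not_mem_nil, or_false, not_or] at hb
      obtain ⟨g1,g2,g3,g4,g5,g6,g7,g8,g9,g10,g11,g12,g13,g14,g15,g16⟩ := hb
      simp [pvCanonMap, PySem.Set.contains, PySem.Set.ofList, PySem.Set.add,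
        PySem.Dict.getD, PySem.Dict.get?,
        h1, h2, h3, h4, h5, h6, h7, h8, h9, h10, h11, h12, h13, h14, h15, h16,
        g1, g2, g3, g4, g5, g6, g7, g8, g9, g10, g11, g12, g13, g14, g15, g16,
        Ne.symm h1, Ne.symm h2, Ne.symm h3, Ne.symm h4, Ne.symm h5, Ne.symm h6, Ne.symm h7,
        Ne.symm h8, Ne.symm h9, Ne.symm h10, Ne.symm h11, Ne.symm h12, Ne.symm h13,
        Ne.symm h14, Ne.symm h15, Ne.symm h16,
        Ne.symm g1, Ne.symm g2, Ne.symm g3, Ne.symm g4, Ne.symm g5, Ne.symm g6, Ne.symm g7,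
        Ne.symm g8, Ne.symm g9, Ne.symm g10, Ne.symm g11, Ne.symm g12, Ne.symm g13,
        Ne.symm g14, Ne.symm g15, Ne.symm g16]

-- ===== VERDICT (by name: the statement is the Claim_ definition above) =====
theorem is_same_language_family_py_spec : Claim_equal_is_same_language_family_py := by
  intro lang1 lang2 _
  unfold Spec_is_same_language_family_py
  exact pv_core lang1 lang2
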